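-- pv_equiv track=rewrite | github.com/DiscoveryPiscine42Bkk/discovery-piscine-introduction-to-python-Htethtetlwinaung | Rush/ex00/checkmate.py | get_bishop_attack_positions
-- ===== SOURCE A (Python) =====
-- def get_bishop_attack_positions(i, j, board):
--     row_len = len(board)
--     col_len = len(board[0])
--     directions = [
--         (-1, -1),  # Up-Left
--         (-1, 1),   # Up-Right
--         (1, -1),   # Down-Left
--         (1, 1)     # Down-Right
--     ]
--
--     attack = []
--     for dx, dy in directions:
--         x, y = i, j
--         while 0 <= x < row_len and 0 <= y < col_len:
--             x += dx
--             y += dy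
--             if 0 <= x < row_len and 0 <= y < col_len:
--                 attack.append((x, y))
--     return attack
-- ===== SOURCE B (Python) =====
-- def get_bishop_attack_positions(i, j, board):
--     row_len = len(board)
--     col_len = len(board[0])
--     if not (0 <= i < row_len and 0 <= j < col_len):
--         return []
--     up, down = i, row_len - 1 - i
--     left, right = j, col_len - 1 - j
--     attack = []
--     for dx, dy, steps in ((-1, -1, min(up, left)),
--                           (-1, 1, min(up, right)),
--                           (1, -1, min(down, left)),
--                           (1, 1, min(down, right))):
--         attack.extend((i + k * dx, j + k * dy) for k in range(1, steps + 1))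
--     return attack
-- ===== Notes on version B (the rewrite author's own statement) =====
-- stated objective: simpler
-- what changed: Replaces A's four bounded while-loops that re-check board membership at every step with distance-to-edge arithmetic: each direction's step count is computed in closed form (min of distances to the two relevant edges, 0 for off-board starts) and the squares are emitted by a range comprehension.
import Mathlib
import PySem

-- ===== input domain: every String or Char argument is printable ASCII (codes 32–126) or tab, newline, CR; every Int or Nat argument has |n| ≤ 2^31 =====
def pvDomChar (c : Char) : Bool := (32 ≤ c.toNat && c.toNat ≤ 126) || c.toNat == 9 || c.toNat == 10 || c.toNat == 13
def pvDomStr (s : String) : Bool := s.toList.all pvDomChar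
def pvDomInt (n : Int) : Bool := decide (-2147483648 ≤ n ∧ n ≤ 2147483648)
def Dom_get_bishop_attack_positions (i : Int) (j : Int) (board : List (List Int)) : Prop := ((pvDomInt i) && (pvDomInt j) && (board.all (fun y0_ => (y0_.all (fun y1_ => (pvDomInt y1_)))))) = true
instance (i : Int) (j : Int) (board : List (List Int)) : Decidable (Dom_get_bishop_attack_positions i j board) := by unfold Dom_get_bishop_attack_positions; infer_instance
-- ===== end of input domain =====

-- B replaces A's four bounded while-loops with closed-form distance-to-edge step counts and
-- range comprehensions per direction (objective: simpler); return values proved equal on Pre_.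


-- ===== PORT A =====
-- the 'while 0 <= x < row_len and 0 <= y < col_len:' loop of A; fuel only makes the
-- recursion total and is chosen large enough to never be the exiting condition
def pvALoop (fuel : Nat) (R C dx dy x y : Int) (acc : List (Int × Int)) : List (Int × Int) :=
  match fuel with
  | 0 => acc
  | Nat.succ f =>
    if 0 ≤ x ∧ x < R ∧ 0 ≤ y ∧ y < C then
      let x' := x + dx
      let y' := y + dy
      let acc' := if 0 ≤ x' ∧ x' < R ∧ 0 ≤ y' ∧ y' < C then acc ++ [(x', y')] else acc
      pvALoop f R C dx dy x' y' acc'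
    else acc

def get_bishop_attack_positions (i : Int) (j : Int) (board : List (List Int)) : List (Int × Int) :=
  let row_len : Int := board.length
  -- len(board[0]); pyGet? = none is Python's IndexError on the empty board, excluded by Pre_
  let col_len : Int := match PySem.List.pyGet? board 0 with
    | some r => (r.length : Int)
    | none => 0
  let fuel := row_len.toNat + 1
  let attack : List (Int × Int) := []
  let attack := pvALoop fuel row_len col_len (-1) (-1) i j attack  -- Up-Left
  let attack := pvALoop fuel row_len col_len (-1) 1 i j attack     -- Up-Right
  let attack := pvALoop fuel row_len col_len 1 (-1) i j attack     -- Down-Left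
  pvALoop fuel row_len col_len 1 1 i j attack                      -- Down-Right

-- ===== PORT B =====
-- [(i + k*dx, j + k*dy) for k in range(1, steps+1)]
def pvSeg (i j dx dy steps : Int) : List (Int × Int) :=
  (PySem.List.pyRange 1 (steps + 1) 1).map (fun k => (i + k * dx, j + k * dy))

def get_bishop_attack_positions_alt (i : Int) (j : Int) (board : List (List Int)) : List (Int × Int) :=
  let row_len : Int := board.length
  -- len(board[0]); pyGet? = none is Python's IndexError on the empty board, excluded by Pre_
  let col_len : Int := match PySem.List.pyGet? board 0 with
    | some r => (r.length : Int)
    | none => 0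
  if 0 ≤ i ∧ i < row_len ∧ 0 ≤ j ∧ j < col_len then
    let up := i
    let down := row_len - 1 - i
    let left := j
    let right := col_len - 1 - j
    pvSeg i j (-1) (-1) (min up left) ++ pvSeg i j (-1) 1 (min up right) ++
      pvSeg i j 1 (-1) (min down left) ++ pvSeg i j 1 1 (min down right)
  else []

-- ===== PRECONDITION & SPEC =====
-- Pre_ excludes only the empty board, on which A (and B) raise IndexError at board[0].
def Pre_get_bishop_attack_positions (i : Int) (j : Int) (board : List (List Int)) : Prop := board ≠ []
instance (i : Int) (j : Int) (board : List (List Int)) : Decidable (Pre_get_bishop_attack_positions i j board) := by unfold Pre_get_bishop_attack_positions; infer_instance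
def pvWitness_get_bishop_attack_positions : Int × Int × List (List Int) := (1, 1, [[0, 0, 0], [0, 0, 0], [0, 0, 0]])
def Spec_get_bishop_attack_positions (i : Int) (j : Int) (board : List (List Int)) (out : List (Int × Int)) : Prop := out = get_bishop_attack_positions_alt i j board
instance (i : Int) (j : Int) (board : List (List Int)) (out : List (Int × Int)) : Decidable (Spec_get_bishop_attack_positions i j board out) := by unfold Spec_get_bishop_attack_positions; infer_instance

-- ===== CLAIM (what is proved, stated in full; the proofs are below) =====
def Claim_equal_get_bishop_attack_positions : Prop := ∀ (i : Int) (j : Int) (board : List (List Int)), Dom_get_bishop_attack_positions i j board → Pre_get_bishop_attack_positions i j board → Spec_get_bishop_attack_positions i j board (get_bishop_attack_positions i j board)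

-- ===== LEMMAS AND PROOFS =====

-- distance, along axis direction d ∈ {-1,1}, from coordinate x to the last in-bounds coordinate
def pvDist (d x L : Int) : Int := if d = -1 then x else L - 1 - x

theorem pvALoop_out (fuel : Nat) (R C dx dy x y : Int) (acc : List (Int × Int))
    (h : ¬(0 ≤ x ∧ x < R ∧ 0 ≤ y ∧ y < C)) : pvALoop fuel R C dx dy x y acc = acc := by
  cases fuel <;> simp [pvALoop, h]

theorem pvALoop_spec (R C dx dy : Int) (hdx : dx = -1 ∨ dx = 1) (hdy : dy = -1 ∨ dy = 1) :
    ∀ (n fuel : Nat) (x y : Int) (acc : List (Int × Int)),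
      0 ≤ x → x < R → 0 ≤ y → y < C →
      n = (min (pvDist dx x R) (pvDist dy y C)).toNat → n < fuel →
      pvALoop fuel R C dx dy x y acc =
        acc ++ (List.range n).map (fun (k : Nat) => (x + ((k : Int) + 1) * dx, y + ((k : Int) + 1) * dy)) := by
  intro n
  induction n with
  | zero =>
    intro fuel x y acc hx0 hxR hy0 hyC hn hf
    match fuel, hf with
    | Nat.succ f, _ =>
      have hin : 0 ≤ x ∧ x < R ∧ 0 ≤ y ∧ y < C := ⟨hx0, hxR, hy0, hyC⟩
      have hout : ¬(0 ≤ x + dx ∧ x + dx < R ∧ 0 ≤ y + dy ∧ y + dy < C) := by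
        unfold pvDist at hn
        rcases hdx with h1 | h1 <;> rcases hdy with h2 | h2 <;> subst h1 <;> subst h2 <;>
          simp at hn <;> omega
      simp only [pvALoop, if_pos hin, if_neg hout]
      rw [pvALoop_out _ _ _ _ _ _ _ _ hout]
      simp
  | succ m ih =>
    intro fuel x y acc hx0 hxR hy0 hyC hn hf
    match fuel, hf with
    | Nat.succ f, hf =>
      have hin : 0 ≤ x ∧ x < R ∧ 0 ≤ y ∧ y < C := ⟨hx0, hxR, hy0, hyC⟩
      have hbnd : 0 ≤ x + dx ∧ x + dx < R ∧ 0 ≤ y + dy ∧ y + dy < C := by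
        unfold pvDist at hn
        rcases hdx with h1 | h1 <;> rcases hdy with h2 | h2 <;> subst h1 <;> subst h2 <;>
          simp at hn <;> omega
      have hn' : m = (min (pvDist dx (x + dx) R) (pvDist dy (y + dy) C)).toNat := by
        unfold pvDist at hn ⊢
        rcases hdx with h1 | h1 <;> rcases hdy with h2 | h2 <;> subst h1 <;> subst h2 <;>
          simp at hn ⊢ <;> omega
      simp only [pvALoop, if_pos hin, if_pos hbnd]
      rw [ih f (x + dx) (y + dy) _ hbnd.1 hbnd.2.1 hbnd.2.2.1 hbnd.2.2.2 hn' (by omega)]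
      have hsucc : (List.range (m + 1)).map
            (fun (k : Nat) => (x + ((k : Int) + 1) * dx, y + ((k : Int) + 1) * dy)) =
          (x + dx, y + dy) :: (List.range m).map
            (fun (k : Nat) => (x + dx + ((k : Int) + 1) * dx, y + dy + ((k : Int) + 1) * dy)) := by
        rw [List.range_succ_eq_map, List.map_cons, List.map_map]
        congr 1
        · norm_num
        · apply List.map_congr_left
          intro k _
          simp only [Function.comp, Prod.mk.injEq]
          push_cast
          constructor <;> ring
      rw [hsucc]
      simp [List.append_assoc]

theorem pvSeg_eq (i j dx dy s : Int) (hs : 0 ≤ s) :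
    pvSeg i j dx dy s =
      (List.range s.toNat).map (fun (k : Nat) => (i + ((k : Int) + 1) * dx, j + ((k : Int) + 1) * dy)) := by
  unfold pvSeg
  rw [PySem.List.pyRange_one]
  have h1 : (s + 1 - 1).toNat = s.toNat := by omega
  rw [h1, List.map_map]
  apply List.map_congr_left
  intro k _
  simp only [Function.comp, Prod.mk.injEq]
  constructor <;> push_cast <;> ring

-- ===== VERDICT (by name: the statement is the Claim_ definition above) =====
theorem get_bishop_attack_positions_spec : Claim_equal_get_bishop_attack_positions := by
  intro i j board _ _
  unfold Spec_get_bishop_attack_positions get_bishop_attack_positions get_bishop_attack_positions_alt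
  set R : Int := (board.length : Int) with hR
  set C : Int := (match PySem.List.pyGet? board 0 with
    | some r => (r.length : Int)
    | none => 0) with hC
  dsimp only
  by_cases hin : 0 ≤ i ∧ i < R ∧ 0 ≤ j ∧ j < C
  · obtain ⟨hi0, hiR, hj0, hjC⟩ := hin
    rw [pvALoop_spec R C (-1) (-1) (Or.inl rfl) (Or.inl rfl)
          ((min (pvDist (-1) i R) (pvDist (-1) j C)).toNat) _ i j _ hi0 hiR hj0 hjC rfl
          (by unfold pvDist; simp; omega),
        pvALoop_spec R C (-1) 1 (Or.inl rfl) (Or.inr rfl)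
          ((min (pvDist (-1) i R) (pvDist 1 j C)).toNat) _ i j _ hi0 hiR hj0 hjC rfl
          (by unfold pvDist; simp; omega),
        pvALoop_spec R C 1 (-1) (Or.inr rfl) (Or.inl rfl)
          ((min (pvDist 1 i R) (pvDist (-1) j C)).toNat) _ i j _ hi0 hiR hj0 hjC rfl
          (by unfold pvDist; simp; omega),
        pvALoop_spec R C 1 1 (Or.inr rfl) (Or.inr rfl)
          ((min (pvDist 1 i R) (pvDist 1 j C)).toNat) _ i j _ hi0 hiR hj0 hjC rfl
          (by unfold pvDist; simp; omega)]
    rw [if_pos ⟨hi0, hiR, hj0, hjC⟩]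
    rw [pvSeg_eq i j (-1) (-1) _ (by omega), pvSeg_eq i j (-1) 1 _ (by omega),
        pvSeg_eq i j 1 (-1) _ (by omega), pvSeg_eq i j 1 1 _ (by omega)]
    unfold pvDist
    simp [List.append_assoc]
  · rw [if_neg hin]
    rw [pvALoop_out _ _ _ _ _ _ _ _ hin, pvALoop_out _ _ _ _ _ _ _ _ hin,
        pvALoop_out _ _ _ _ _ _ _ _ hin, pvALoop_out _ _ _ _ _ _ _ _ hin]
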